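-- pv_equiv track=rewrite | github.com/BrenoGustavo/AdventoOfCode | 2024/solutions/day_18.py | find_blocking_byte
-- ===== SOURCE A (Python) =====
-- from collections import deque
--
-- def is_path_possible(grid, start, end):
--     n = len(grid)
--     queue = deque([start])
--     visited = set([start])
--     directions = [(-1, 0), (1, 0), (0, -1), (0, 1)]
--
--     while queue:
--         x, y = queue.popleft()
--
--         if (x, y) == end:
--             return True
--
--         for dx, dy in directions:
--             nx, ny = x + dx, y + dy
--
--             if (
--                 0 <= nx < n
--                 and 0 <= ny < n
--                 and grid[nx][ny] == "."
--                 and (nx, ny) not in visited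
--             ):
--                 visited.add((nx, ny))
--                 queue.append((nx, ny))
--
--     return False
--
-- def find_blocking_byte(grid_size, bytes_list):
--     grid = [["." for _ in range(grid_size)] for _ in range(grid_size)]
--     start, end = (0, 0), (grid_size - 1, grid_size - 1)
--
--     for x, y in bytes_list:
--         grid[y][x] = "#"
--         if not is_path_possible(grid, start, end):
--             return f"{x},{y}"
--
--     return None
-- ===== SOURCE B (Python) =====
-- def find_blocking_byte(grid_size, bytes_list):
--     n = grid_size
--
--     def blocked(k):
--         # grid after the first k bytes have fallen
--         grid = [["." for _ in range(n)] for _ in range(n)]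
--         for x, y in bytes_list[:k]:
--             grid[y][x] = "#"
--         # frontier-expansion reachability from (0, 0)
--         reach = {(0, 0)}
--         frontier = {(0, 0)}
--         while True:
--             new = set()
--             for x, y in frontier:
--                 for dx, dy in ((-1, 0), (1, 0), (0, -1), (0, 1)):
--                     nx, ny = x + dx, y + dy
--                     if (
--                         0 <= nx < n
--                         and 0 <= ny < n
--                         and grid[nx][ny] == "."
--                         and (nx, ny) not in reach
--                     ):
--                         new.add((nx, ny))
--             if not new:
--                 break
--             reach |= new
--             frontier = new
--         return (n - 1, n - 1) not in reach
--
--     if not bytes_list or not blocked(len(bytes_list)):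
--         return None
--     # blocked(k) is monotone in k: binary search for the least blocking prefix
--     lo, hi = 1, len(bytes_list)
--     while lo < hi:
--         mid = (lo + hi) // 2
--         if blocked(mid):
--             hi = mid
--         else:
--             lo = mid + 1
--     x, y = bytes_list[lo - 1]
--     return f"{x},{y}"
-- ===== Notes on version B (the rewrite author's own statement) =====
-- stated objective: faster
-- what changed: A re-runs a BFS after every single byte (linear scan over prefixes); B binary-searches on the prefix length, exploiting that 'blocked after k bytes' is monotone in k, and decides each probe with a frontier-expansion reachability sweep, so only O(log m) connectivity checks are run instead of m.
-- outside the precondition, e.g. on find_blocking_byte(2, [(0, 1), (1, 0), (99, 99)]): A returns '1,0', B raises IndexError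
import Mathlib
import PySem

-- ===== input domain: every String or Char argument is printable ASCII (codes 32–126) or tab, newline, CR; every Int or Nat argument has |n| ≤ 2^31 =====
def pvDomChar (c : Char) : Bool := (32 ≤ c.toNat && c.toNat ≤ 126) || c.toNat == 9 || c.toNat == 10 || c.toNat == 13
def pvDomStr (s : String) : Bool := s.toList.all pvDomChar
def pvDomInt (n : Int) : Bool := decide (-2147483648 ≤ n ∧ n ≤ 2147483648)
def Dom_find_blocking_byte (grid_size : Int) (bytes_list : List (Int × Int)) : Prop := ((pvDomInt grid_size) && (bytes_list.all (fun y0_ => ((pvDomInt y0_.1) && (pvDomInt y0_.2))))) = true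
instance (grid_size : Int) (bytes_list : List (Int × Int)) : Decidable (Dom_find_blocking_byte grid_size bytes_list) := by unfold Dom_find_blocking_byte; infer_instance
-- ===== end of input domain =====

-- B replaces A's BFS-after-every-byte linear scan by a binary search on the number of
-- fallen bytes (blocking is monotone in the prefix length), each probe decided by a
-- frontier-expansion reachability sweep: O(log m) connectivity checks instead of m.

-- ===== PORT A =====
-- helpers shared by both ports (both Pythons build the grid, read cells and walk the
-- same 4 directions with identical code):
-- grid = [["." for _ in range(grid_size)] for _ in range(grid_size)]
def pvMakeGrid (n : Int) : List (List String) :=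
  List.replicate n.toNat (List.replicate n.toNat ".")

-- grid[y][x] = "#"  (Python negative-index wraparound included, via pySetD/pyGetD)
def pvSetCell (grid : List (List String)) (y x : Int) : List (List String) :=
  PySem.List.pySetD grid y (PySem.List.pySetD (PySem.List.pyGetD grid y []) x "#")

-- grid[a][b]  (only evaluated behind 0 ≤ a,b < n guards in both programs)
def pvCell (grid : List (List String)) (a b : Int) : Option String :=
  (PySem.List.pyGet? grid a).bind (fun row => PySem.List.pyGet? row b)

def pvDirs : List (Int × Int) := [(-1, 0), (1, 0), (0, -1), (0, 1)]

-- body of A's `for dx, dy in directions:` loop (state = (queue, visited))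
def pvBfsStep (grid : List (List String)) (x y : Int)
    (st : List (Int × Int) × Std.HashSet (Int × Int)) (d : Int × Int) :
    List (Int × Int) × Std.HashSet (Int × Int) :=
  let nx := x + d.1
  let ny := y + d.2
  if 0 ≤ nx ∧ nx < (grid.length : Int) ∧ 0 ≤ ny ∧ ny < (grid.length : Int) ∧
      pvCell grid nx ny = some "." ∧ (nx, ny) ∉ st.2 then
    (st.1 ++ [(nx, ny)], st.2.insert (nx, ny))
  else st

-- A's `while queue:` loop; the fuel is proven sufficient below (pvBfs_correct), so this
-- computes exactly what the Python while-loop computes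
def pvBfs (grid : List (List String)) (endp : Int × Int) :
    Nat → List (Int × Int) → Std.HashSet (Int × Int) → Option Bool
  | 0, _, _ => none
  | _ + 1, [], _ => some false
  | fuel + 1, p :: queue, visited =>
    if p = endp then some true
    else
      let st := pvDirs.foldl (pvBfsStep grid p.1 p.2) (queue, visited)
      pvBfs grid endp fuel st.1 st.2

def pvIsPathPossible (grid : List (List String)) (start endp : Int × Int) : Bool :=
  (pvBfs grid endp (2 * grid.length * grid.length + 4) [start]
    (Std.HashSet.ofList [start])).getD false

-- A's `for x, y in bytes_list:` loop, carrying the mutated grid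
def pvFindGo (endp : Int × Int) (grid : List (List String)) :
    List (Int × Int) → Option String
  | [] => none
  | (x, y) :: rest =>
    let grid' := pvSetCell grid y x
    if pvIsPathPossible grid' (0, 0) endp then pvFindGo endp grid' rest
    else some (PySem.Int.toStr x ++ "," ++ PySem.Int.toStr y)

def find_blocking_byte (grid_size : Int) (bytes_list : List (Int × Int)) : Option String :=
  pvFindGo (grid_size - 1, grid_size - 1) (pvMakeGrid grid_size) bytes_list

-- ===== PORT B =====
-- body of B's `for x, y in frontier:` loop: collect unreached open in-range neighbours
def pvNewStep (n : Int) (grid : List (List String)) (reach : Std.HashSet (Int × Int))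
    (acc : Std.HashSet (Int × Int)) (p : Int × Int) : Std.HashSet (Int × Int) :=
  pvDirs.foldl (fun acc d =>
    let nx := p.1 + d.1
    let ny := p.2 + d.2
    if 0 ≤ nx ∧ nx < n ∧ 0 ≤ ny ∧ ny < n ∧ pvCell grid nx ny = some "." ∧
        (nx, ny) ∉ reach then
      acc.insert (nx, ny)
    else acc) acc

-- B's `while True:` frontier-expansion loop; fuel proven sufficient below (pvSweep_correct)
def pvSweep (n : Int) (grid : List (List String)) :
    Nat → Std.HashSet (Int × Int) → Std.HashSet (Int × Int) → Option (Std.HashSet (Int × Int))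
  | 0, _, _ => none
  | fuel + 1, reach, frontier =>
    let nw := frontier.toList.foldl (pvNewStep n grid reach) ∅
    if nw.isEmpty then some reach
    else pvSweep n grid fuel (reach.insertMany nw.toList) nw

-- B's `blocked(k)`
def pvBlocked (grid_size : Int) (bytes_list : List (Int × Int)) (k : Int) : Bool :=
  let n := grid_size
  let grid := (PySem.List.slice bytes_list none (some k)).foldl
    (fun g p => pvSetCell g p.2 p.1) (pvMakeGrid n)
  match pvSweep n grid (grid.length * grid.length + 2)
      (Std.HashSet.ofList [((0 : Int), (0 : Int))]) (Std.HashSet.ofList [((0 : Int), (0 : Int))]) with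
  | some reach => !(reach.contains (n - 1, n - 1))
  | none => false

-- B's `while lo < hi:` binary search
def pvBisect (grid_size : Int) (bytes_list : List (Int × Int)) (lo hi : Int) : Int :=
  if h : lo < hi then
    let mid := PySem.Int.floordiv (lo + hi) 2
    if pvBlocked grid_size bytes_list mid then pvBisect grid_size bytes_list lo mid
    else pvBisect grid_size bytes_list (mid + 1) hi
  else lo
termination_by (hi - lo).toNat
decreasing_by
  · have h1 := (PySem.Int.floordiv_two_mid_bounds (le_of_lt h)).1
    have h2 : PySem.Int.floordiv (lo + hi) 2 < hi := by
      rw [PySem.Int.floordiv_lt_iff_lt_mul (by omega)]; omega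
    omega
  · have h1 := (PySem.Int.floordiv_two_mid_bounds (le_of_lt h)).1
    have h2 : PySem.Int.floordiv (lo + hi) 2 < hi := by
      rw [PySem.Int.floordiv_lt_iff_lt_mul (by omega)]; omega
    omega

def find_blocking_byte_alt (grid_size : Int) (bytes_list : List (Int × Int)) : Option String :=
  if bytes_list = [] ∨ pvBlocked grid_size bytes_list (PySem.List.len bytes_list) = false then
    none
  else
    let lo := pvBisect grid_size bytes_list 1 (PySem.List.len bytes_list)
    let p := PySem.List.pyGetD bytes_list (lo - 1) (0, 0)
    some (PySem.Int.toStr p.1 ++ "," ++ PySem.Int.toStr p.2)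

-- ===== PRECONDITION & SPEC =====
-- Pre_ requires every listed byte to lie inside the grid (Python index range [-n, n)):
-- outside it A raises IndexError at the byte it reaches — except that A, which stops
-- scanning at the first blocking byte, can also return early without ever reaching a
-- later out-of-range byte, while B's binary search reads the whole list and raises there;
-- those early-return inputs are excluded too (see claim cites).
def Pre_find_blocking_byte (grid_size : Int) (bytes_list : List (Int × Int)) : Prop :=
  ∀ p ∈ bytes_list, -grid_size ≤ p.1 ∧ p.1 < grid_size ∧ -grid_size ≤ p.2 ∧ p.2 < grid_size

instance (grid_size : Int) (bytes_list : List (Int × Int)) :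
    Decidable (Pre_find_blocking_byte grid_size bytes_list) := by
  unfold Pre_find_blocking_byte; infer_instance

def pvWitness_find_blocking_byte : Int × (List (Int × Int)) := (2, [(0, 1), (1, 0)])

def Spec_find_blocking_byte (grid_size : Int) (bytes_list : List (Int × Int))
    (out : Option String) : Prop := out = find_blocking_byte_alt grid_size bytes_list

instance (grid_size : Int) (bytes_list : List (Int × Int)) (out : Option String) :
    Decidable (Spec_find_blocking_byte grid_size bytes_list out) := by
  unfold Spec_find_blocking_byte; infer_instance

-- ===== CLAIM (what is proved, stated in full; the proofs are below) =====
def Claim_equal_find_blocking_byte : Prop := ∀ (grid_size : Int) (bytes_list : List (Int × Int)), Dom_find_blocking_byte grid_size bytes_list → Pre_find_blocking_byte grid_size bytes_list → Spec_find_blocking_byte grid_size bytes_list (find_blocking_byte grid_size bytes_list)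


-- ===== LEMMAS AND PROOFS =====

-- The semantic reachability relation both connectivity procedures are proved against.
def PVValid (N : Nat) (p : Int × Int) : Prop :=
  0 ≤ p.1 ∧ p.1 < (N : Int) ∧ 0 ≤ p.2 ∧ p.2 < (N : Int)

def PVStep (grid : List (List String)) (p q : Int × Int) : Prop :=
  (∃ d ∈ pvDirs, q = (p.1 + d.1, p.2 + d.2)) ∧ PVValid grid.length q ∧
    pvCell grid q.1 q.2 = some "."

inductive PVReach (grid : List (List String)) : Int × Int → Prop
  | start : PVReach grid (0, 0)
  | step {p q : Int × Int} : PVReach grid p → PVStep grid p q → PVReach grid q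

lemma pv_nodup_toList (m : Std.HashSet (Int × Int)) : m.toList.Nodup :=
  Std.HashSet.distinct_toList.imp (by
    intro a b h he
    subst he
    simp at h)

-- visited/reach sets live inside the n² cells plus the start
lemma pv_card_le (N : Nat) (vis : Std.HashSet (Int × Int))
    (hv : ∀ p ∈ vis, p = ((0 : Int), (0 : Int)) ∨ PVValid N p) :
    vis.size ≤ N * N + 1 := by
  classical
  have hsub : vis.toList.toFinset ⊆
      insert ((0 : Int), (0 : Int))
        ((Finset.Icc (0 : Int) ((N : Int) - 1)) ×ˢ (Finset.Icc (0 : Int) ((N : Int) - 1))) := by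
    intro p hp
    rcases hv p (Std.HashSet.mem_toList.mp (List.mem_toFinset.mp hp)) with h | h
    · simp [h]
    · rcases h with ⟨h1, h2, h3, h4⟩
      apply Finset.mem_insert_of_mem
      rw [Finset.mem_product]
      constructor <;> rw [Finset.mem_Icc] <;> omega
  have h1 : vis.toList.toFinset.card = vis.toList.length :=
    List.toFinset_card_of_nodup (pv_nodup_toList vis)
  have h1' : vis.toList.length = vis.size := Std.HashSet.length_toList
  have h2 := Finset.card_le_card hsub
  have h3 := Finset.card_insert_le ((0 : Int), (0 : Int))
    ((Finset.Icc (0 : Int) ((N : Int) - 1)) ×ˢ (Finset.Icc (0 : Int) ((N : Int) - 1)))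
  have h4 : ((Finset.Icc (0 : Int) ((N : Int) - 1)) ×ˢ
      (Finset.Icc (0 : Int) ((N : Int) - 1))).card = N * N := by
    rw [Finset.card_product, Int.card_Icc]
    simp
  omega

-- ---- A's BFS computes PVReach ----

lemma pvBfs_fold (grid : List (List String)) (p : Int × Int) (hpr : PVReach grid p) :
    ∀ (ds : List (Int × Int)) (st : List (Int × Int) × Std.HashSet (Int × Int)),
      (∀ d ∈ ds, d ∈ pvDirs) →
      (∀ r ∈ st.1, r ∈ st.2) →
      (∀ r ∈ st.2, PVReach grid r) →
      (∀ r ∈ st.2, r = (0, 0) ∨ PVValid grid.length r) →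
      (∀ r ∈ (ds.foldl (pvBfsStep grid p.1 p.2) st).1,
          r ∈ (ds.foldl (pvBfsStep grid p.1 p.2) st).2) ∧
      (∀ r ∈ (ds.foldl (pvBfsStep grid p.1 p.2) st).2, PVReach grid r) ∧
      (∀ r ∈ (ds.foldl (pvBfsStep grid p.1 p.2) st).2, r = (0, 0) ∨ PVValid grid.length r) ∧
      (∀ r ∈ st.2, r ∈ (ds.foldl (pvBfsStep grid p.1 p.2) st).2) ∧
      (∀ r ∈ st.1, r ∈ (ds.foldl (pvBfsStep grid p.1 p.2) st).1) ∧
      (∀ r ∈ (ds.foldl (pvBfsStep grid p.1 p.2) st).2,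
          r ∈ st.2 ∨ r ∈ (ds.foldl (pvBfsStep grid p.1 p.2) st).1) ∧
      ((ds.foldl (pvBfsStep grid p.1 p.2) st).1.length + st.2.size =
          st.1.length + (ds.foldl (pvBfsStep grid p.1 p.2) st).2.size) ∧
      (st.1.length ≤ (ds.foldl (pvBfsStep grid p.1 p.2) st).1.length) ∧
      (∀ d ∈ ds, PVValid grid.length (p.1 + d.1, p.2 + d.2) →
          pvCell grid (p.1 + d.1) (p.2 + d.2) = some "." →
          (p.1 + d.1, p.2 + d.2) ∈ (ds.foldl (pvBfsStep grid p.1 p.2) st).2) := by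
  intro ds
  induction ds with
  | nil =>
    intro st _ h3 h4 h5
    simp only [List.foldl_nil]
    refine ⟨h3, h4, h5, fun r hr => hr, fun r hr => hr, fun r hr => Or.inl hr, ?_, ?_, ?_⟩
    · trivial
    · trivial
    · intro d hd
      simp at hd
  | cons d ds ih =>
    intro st hds h3 h4 h5
    have hd : d ∈ pvDirs := hds d (List.mem_cons_self ..)
    simp only [List.foldl_cons]
    set c : Int × Int := (p.1 + d.1, p.2 + d.2) with hc
    by_cases hcond : 0 ≤ c.1 ∧ c.1 < (grid.length : Int) ∧ 0 ≤ c.2 ∧ c.2 < (grid.length : Int) ∧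
        pvCell grid c.1 c.2 = some "." ∧ c ∉ st.2
    · have hstep : pvBfsStep grid p.1 p.2 st d = (st.1 ++ [c], st.2.insert c) := by
        simp only [pvBfsStep]
        rw [if_pos hcond]
      rw [hstep]
      have hcnotmem : c ∉ st.2 := hcond.2.2.2.2.2
      have hmemins : ∀ r : Int × Int, r ∈ st.2.insert c ↔ r ∈ st.2 ∨ r = c := by
        intro r
        rw [Std.HashSet.mem_insert]
        constructor
        · rintro (h | h)
          · exact Or.inr (eq_of_beq h).symm
          · exact Or.inl h
        · rintro (h | h)
          · exact Or.inr h
          · exact Or.inl (by simp [h])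
      have hsize : (st.2.insert c).size = st.2.size + 1 := by
        rw [Std.HashSet.size_insert, if_neg hcnotmem]
      have hreachc : PVReach grid c :=
        PVReach.step hpr ⟨⟨d, hd, rfl⟩, ⟨hcond.1, hcond.2.1, hcond.2.2.1, hcond.2.2.2.1⟩,
          hcond.2.2.2.2.1⟩
      have ihres := ih (st.1 ++ [c], st.2.insert c)
        (fun d' hd' => hds d' (List.mem_cons_of_mem _ hd'))
        (by
          intro r hr
          rw [hmemins]
          rcases List.mem_append.mp hr with h | h
          · exact Or.inl (h3 r h)
          · simp at h; exact Or.inr h)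
        (by
          intro r hr
          rcases (hmemins r).mp hr with h | h
          · exact h4 r h
          · exact h ▸ hreachc)
        (by
          intro r hr
          rcases (hmemins r).mp hr with h | h
          · exact h5 r h
          · exact Or.inr (h ▸ ⟨hcond.1, hcond.2.1, hcond.2.2.1, hcond.2.2.2.1⟩))
      obtain ⟨i1, i3, i4, i5, i6, i7, i8, i9, i10⟩ := ihres
      refine ⟨i1, i3, i4, ?_, ?_, ?_, ?_, ?_, ?_⟩
      · intro r hr
        exact i5 r ((hmemins r).mpr (Or.inl hr))
      · intro r hr
        exact i6 r (List.mem_append.mpr (Or.inl hr))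
      · intro r hr
        rcases i7 r hr with h | h
        · rcases (hmemins r).mp h with h' | h'
          · exact Or.inl h'
          · right
            rw [h']
            exact i6 c (by simp)
        · exact Or.inr h
      · simp only [hsize, List.length_append, List.length_singleton] at i8 ⊢
        omega
      · calc st.1.length ≤ (st.1 ++ [c]).length := by simp
          _ ≤ _ := i9
      · intro d' hd' hv ho
        rcases List.mem_cons.mp hd' with h | h
        · subst h
          exact i5 c ((hmemins c).mpr (Or.inr rfl))
        · exact i10 d' h hv ho
    · have hstep : pvBfsStep grid p.1 p.2 st d = st := by
        simp only [pvBfsStep]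
        rw [if_neg hcond]
      rw [hstep]
      have ihres := ih st (fun d' hd' => hds d' (List.mem_cons_of_mem _ hd')) h3 h4 h5
      obtain ⟨i1, i3, i4, i5, i6, i7, i8, i9, i10⟩ := ihres
      refine ⟨i1, i3, i4, i5, i6, i7, i8, i9, ?_⟩
      intro d' hd' hv ho
      rcases List.mem_cons.mp hd' with h | h
      · subst h
        have hmem : c ∈ st.2 := by
          by_contra hnm
          exact hcond ⟨hv.1, hv.2.1, hv.2.2.1, hv.2.2.2, ho, hnm⟩
        exact i5 c hmem
      · exact i10 d' h hv ho

lemma pvBfs_correct (grid : List (List String)) (endp : Int × Int) :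
    ∀ (fuel : Nat) (q : List (Int × Int)) (vis : Std.HashSet (Int × Int)),
      (∀ r ∈ q, r ∈ vis) →
      ((0, 0) ∈ vis) →
      (∀ r ∈ vis, PVReach grid r) →
      (∀ r ∈ vis, r = (0, 0) ∨ PVValid grid.length r) →
      (∀ r ∈ vis, r ∉ q → r ≠ endp ∧ ∀ c, PVStep grid r c → c ∈ vis) →
      2 * (grid.length * grid.length + 1 - vis.size) + q.length + 1 ≤ fuel →
      ∃ b, pvBfs grid endp fuel q vis = some b ∧ (b = true ↔ PVReach grid endp) := by
  intro fuel
  induction fuel with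
  | zero => intro q vis _ _ _ _ _ hfuel; omega
  | succ fuel ih =>
    intro q vis hqv h00 hreach hvalid hclosed hfuel
    match q with
    | [] =>
      refine ⟨false, rfl, ?_⟩
      simp only [Bool.false_eq_true, false_iff]
      intro hre
      have hall : ∀ c, PVReach grid c → c ∈ vis := by
        intro c hc
        induction hc with
        | start => exact h00
        | step hp hs ihc => exact (hclosed _ ihc (by simp)).2 _ hs
      exact (hclosed endp (hall endp hre) (by simp)).1 rfl
    | p :: queue =>
      by_cases hpe : p = endp
      · refine ⟨true, ?_, by simp [hpe ▸ hreach p (hqv p (by simp))]⟩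
        simp [pvBfs, hpe]
      · have hfold := pvBfs_fold grid p (hreach p (hqv p (by simp))) pvDirs (queue, vis)
          (fun d hd => hd) (fun r hr => hqv r (by simp [hr])) hreach hvalid
        set st := pvDirs.foldl (pvBfsStep grid p.1 p.2) (queue, vis) with hst
        obtain ⟨i1, i3, i4, i5, i6, i7, i8, i9, i10⟩ := hfold
        have hstep : pvBfs grid endp (fuel + 1) (p :: queue) vis = pvBfs grid endp fuel st.1 st.2 := by
          simp only [pvBfs, if_neg hpe]
          rw [← hst]
        rw [hstep]
        have hcard : st.2.size ≤ grid.length * grid.length + 1 := pv_card_le _ _ i4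
        have i8' : st.1.length + vis.size = queue.length + st.2.size := i8
        have i9' : queue.length ≤ st.1.length := i9
        have hvisle : vis.size ≤ st.2.size := by omega
        apply ih st.1 st.2 i1 (i5 _ h00) i3 i4
        · intro r hr hrq
          rcases i7 r hr with hrv | hrq'
          · by_cases hrpq : r ∈ p :: queue
            · rcases List.mem_cons.mp hrpq with hrp | hrq''
              · subst hrp
                refine ⟨hpe, ?_⟩
                intro c hs
                obtain ⟨⟨d, hd, hcd⟩, hv, ho⟩ := hs
                subst hcd
                exact i10 d hd hv ho
              · exact absurd (i6 r hrq'') hrq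
            · obtain ⟨hne, hcl⟩ := hclosed r hrv hrpq
              exact ⟨hne, fun c hs => i5 _ (hcl c hs)⟩
          · exact absurd hrq' hrq
        · simp only [List.length_cons] at hfuel
          omega

lemma pvIsPathPossible_iff (grid : List (List String)) (endp : Int × Int) :
    pvIsPathPossible grid (0, 0) endp = true ↔ PVReach grid endp := by
  have hmem0 : ∀ r : Int × Int, r ∈ Std.HashSet.ofList [((0 : Int), (0 : Int))] ↔
      r = ((0 : Int), (0 : Int)) := by
    intro r
    rw [Std.HashSet.mem_ofList]
    simp [List.contains_eq_mem, eq_comm]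
  obtain ⟨b, hb, hiff⟩ := pvBfs_correct grid endp (2 * grid.length * grid.length + 4)
    [((0 : Int), (0 : Int))] (Std.HashSet.ofList [((0 : Int), (0 : Int))])
    (by intro r hr; simp at hr; rw [hmem0, hr])
    ((hmem0 _).mpr rfl)
    (by intro r hr; rw [hmem0] at hr; subst hr; exact PVReach.start)
    (by intro r hr; rw [hmem0] at hr; exact Or.inl hr)
    (by intro r hr hr2; rw [hmem0] at hr; simp [hr] at hr2)
    (by
      have h : 2 * grid.length * grid.length = 2 * (grid.length * grid.length) := by ring
      have h2 : List.length [((0 : Int), (0 : Int))] = 1 := rfl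
      omega)
  unfold pvIsPathPossible
  rw [hb]
  simp [hiff]

-- ---- B's frontier sweep computes PVReach ----

lemma pvNewStep_fold (n : Int) (grid : List (List String)) (reach : Std.HashSet (Int × Int))
    (p : Int × Int) :
    ∀ (ds : List (Int × Int)) (acc : Std.HashSet (Int × Int)),
      (∀ d ∈ ds, d ∈ pvDirs) →
      (∀ c ∈ acc, c ∈ ds.foldl (fun acc d =>
          let nx := p.1 + d.1
          let ny := p.2 + d.2
          if 0 ≤ nx ∧ nx < n ∧ 0 ≤ ny ∧ ny < n ∧ pvCell grid nx ny = some "." ∧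
              (nx, ny) ∉ reach then acc.insert (nx, ny) else acc) acc) ∧
      (∀ c ∈ ds.foldl (fun acc d =>
          let nx := p.1 + d.1
          let ny := p.2 + d.2
          if 0 ≤ nx ∧ nx < n ∧ 0 ≤ ny ∧ ny < n ∧ pvCell grid nx ny = some "." ∧
              (nx, ny) ∉ reach then acc.insert (nx, ny) else acc) acc,
          c ∈ acc ∨ (c ∉ reach ∧ (∃ d ∈ pvDirs, c = (p.1 + d.1, p.2 + d.2)) ∧
            (0 ≤ c.1 ∧ c.1 < n ∧ 0 ≤ c.2 ∧ c.2 < n) ∧ pvCell grid c.1 c.2 = some ".")) ∧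
      (∀ d ∈ ds, (0 ≤ p.1 + d.1 ∧ p.1 + d.1 < n ∧ 0 ≤ p.2 + d.2 ∧ p.2 + d.2 < n) →
          pvCell grid (p.1 + d.1) (p.2 + d.2) = some "." →
          (p.1 + d.1, p.2 + d.2) ∈ reach ∨
            (p.1 + d.1, p.2 + d.2) ∈ ds.foldl (fun acc d =>
              let nx := p.1 + d.1
              let ny := p.2 + d.2
              if 0 ≤ nx ∧ nx < n ∧ 0 ≤ ny ∧ ny < n ∧ pvCell grid nx ny = some "." ∧
                  (nx, ny) ∉ reach then acc.insert (nx, ny) else acc) acc) := by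
  intro ds
  induction ds with
  | nil =>
    intro acc _
    simp only [List.foldl_nil]
    exact ⟨fun c hc => hc, fun c hc => Or.inl hc, by simp⟩
  | cons d ds ih =>
    intro acc hds
    have hd : d ∈ pvDirs := hds d (List.mem_cons_self ..)
    set f : Std.HashSet (Int × Int) → (Int × Int) → Std.HashSet (Int × Int) := fun acc d =>
      let nx := p.1 + d.1
      let ny := p.2 + d.2
      if 0 ≤ nx ∧ nx < n ∧ 0 ≤ ny ∧ ny < n ∧ pvCell grid nx ny = some "." ∧
          (nx, ny) ∉ reach then acc.insert (nx, ny) else acc with hf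
    simp only [List.foldl_cons]
    by_cases hcond : 0 ≤ p.1 + d.1 ∧ p.1 + d.1 < n ∧ 0 ≤ p.2 + d.2 ∧ p.2 + d.2 < n ∧
        pvCell grid (p.1 + d.1) (p.2 + d.2) = some "." ∧ (p.1 + d.1, p.2 + d.2) ∉ reach
    · have hone : f acc d = acc.insert (p.1 + d.1, p.2 + d.2) := by
        rw [hf]
        dsimp only
        rw [if_pos hcond]
      rw [hone]
      have hmemins : ∀ r : Int × Int, r ∈ acc.insert (p.1 + d.1, p.2 + d.2) ↔
          r ∈ acc ∨ r = (p.1 + d.1, p.2 + d.2) := by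
        intro r
        rw [Std.HashSet.mem_insert]
        constructor
        · rintro (h | h)
          · exact Or.inr (eq_of_beq h).symm
          · exact Or.inl h
        · rintro (h | h)
          · exact Or.inr h
          · exact Or.inl (by simp [h])
      obtain ⟨i2, i3, i4⟩ := ih (acc.insert (p.1 + d.1, p.2 + d.2))
        (fun d' hd' => hds d' (List.mem_cons_of_mem _ hd'))
      refine ⟨?_, ?_, ?_⟩
      · intro x hx
        exact i2 x ((hmemins x).mpr (Or.inl hx))
      · intro x hx
        rcases i3 x hx with h | h
        · rcases (hmemins x).mp h with h' | h'
          · exact Or.inl h'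
          · subst h'
            exact Or.inr ⟨hcond.2.2.2.2.2, ⟨d, hd, rfl⟩,
              ⟨hcond.1, hcond.2.1, hcond.2.2.1, hcond.2.2.2.1⟩, hcond.2.2.2.2.1⟩
        · exact Or.inr h
      · intro d' hd' hv ho
        rcases List.mem_cons.mp hd' with h | h
        · subst h
          exact Or.inr (i2 _ ((hmemins _).mpr (Or.inr rfl)))
        · exact i4 d' h hv ho
    · have hone : f acc d = acc := by
        rw [hf]
        dsimp only
        rw [if_neg hcond]
      rw [hone]
      obtain ⟨i2, i3, i4⟩ := ih acc (fun d' hd' => hds d' (List.mem_cons_of_mem _ hd'))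
      refine ⟨i2, i3, ?_⟩
      intro d' hd' hv ho
      rcases List.mem_cons.mp hd' with h | h
      · subst h
        have hmem : (p.1 + d'.1, p.2 + d'.2) ∈ reach := by
          by_contra hnm
          exact hcond ⟨hv.1, hv.2.1, hv.2.2.1, hv.2.2.2, ho, hnm⟩
        exact Or.inl hmem
      · exact i4 d' h hv ho

lemma pvNew_fold (n : Int) (grid : List (List String)) (reach : Std.HashSet (Int × Int))
    (F : List (Int × Int)) :
    ∀ (fr : List (Int × Int)) (acc : Std.HashSet (Int × Int)),
      (∀ q ∈ fr, q ∈ F) →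
      (∀ c ∈ acc, c ∉ reach ∧ ∃ q ∈ F, (∃ d ∈ pvDirs, c = (q.1 + d.1, q.2 + d.2)) ∧
        (0 ≤ c.1 ∧ c.1 < n ∧ 0 ≤ c.2 ∧ c.2 < n) ∧ pvCell grid c.1 c.2 = some ".") →
      (∀ c ∈ fr.foldl (pvNewStep n grid reach) acc,
          c ∉ reach ∧ ∃ q ∈ F, (∃ d ∈ pvDirs, c = (q.1 + d.1, q.2 + d.2)) ∧
            (0 ≤ c.1 ∧ c.1 < n ∧ 0 ≤ c.2 ∧ c.2 < n) ∧ pvCell grid c.1 c.2 = some ".") ∧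
      (∀ c ∈ acc, c ∈ fr.foldl (pvNewStep n grid reach) acc) ∧
      (∀ q ∈ fr, ∀ d ∈ pvDirs,
          (0 ≤ q.1 + d.1 ∧ q.1 + d.1 < n ∧ 0 ≤ q.2 + d.2 ∧ q.2 + d.2 < n) →
          pvCell grid (q.1 + d.1) (q.2 + d.2) = some "." →
          (q.1 + d.1, q.2 + d.2) ∈ reach ∨
            (q.1 + d.1, q.2 + d.2) ∈ fr.foldl (pvNewStep n grid reach) acc) := by
  intro fr
  induction fr with
  | nil =>
    intro acc _ hsound
    simp only [List.foldl_nil]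
    exact ⟨hsound, fun c hc => hc, by simp⟩
  | cons q fr ih =>
    intro acc hfr hsound
    have hqF : q ∈ F := hfr q (List.mem_cons_self ..)
    simp only [List.foldl_cons]
    obtain ⟨j2, j3, j4⟩ := pvNewStep_fold n grid reach q pvDirs acc (fun d hd => hd)
    have hsound1 : ∀ c ∈ pvNewStep n grid reach acc q,
        c ∉ reach ∧ ∃ q' ∈ F, (∃ d ∈ pvDirs, c = (q'.1 + d.1, q'.2 + d.2)) ∧
          (0 ≤ c.1 ∧ c.1 < n ∧ 0 ≤ c.2 ∧ c.2 < n) ∧ pvCell grid c.1 c.2 = some "." := by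
      intro c hc
      rcases j3 c hc with h | ⟨hnr, hd, hb, ho⟩
      · exact hsound c h
      · exact ⟨hnr, q, hqF, hd, hb, ho⟩
    obtain ⟨i2, i3, i4⟩ := ih (pvNewStep n grid reach acc q)
      (fun q' hq' => hfr q' (List.mem_cons_of_mem _ hq')) hsound1
    refine ⟨i2, ?_, ?_⟩
    · intro c hc
      exact i3 c (j2 c hc)
    · intro q' hq' d hd hb ho
      rcases List.mem_cons.mp hq' with h | h
      · subst h
        rcases j4 d hd hb ho with h' | h'
        · exact Or.inl h'
        · exact Or.inr (i3 _ h')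
      · exact i4 q' h d hd hb ho

lemma pvSweep_correct (n : Int) (grid : List (List String))
    (hn : n = (grid.length : Int)) :
    ∀ (fuel : Nat) (reach frontier : Std.HashSet (Int × Int)),
      ((0, 0) ∈ reach) →
      (∀ q ∈ frontier, q ∈ reach) →
      (∀ q ∈ reach, PVReach grid q) →
      (∀ q ∈ reach, q = (0, 0) ∨ PVValid grid.length q) →
      (∀ q ∈ reach, q ∉ frontier → ∀ c, PVStep grid q c → c ∈ reach) →
      grid.length * grid.length + 2 ≤ fuel + reach.size →
      ∃ R, pvSweep n grid fuel reach frontier = some R ∧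
        (∀ c, c ∈ R ↔ PVReach grid c) := by
  intro fuel
  induction fuel with
  | zero =>
    intro reach frontier _ _ _ hvalid _ hfuel
    have := pv_card_le grid.length reach hvalid
    omega
  | succ fuel ih =>
    intro reach frontier h00 hfr hreach hvalid hclosed hfuel
    obtain ⟨j2, j3, j4⟩ := pvNew_fold n grid reach frontier.toList frontier.toList ∅
      (fun q hq => hq) (by intro c hc; exact absurd hc Std.HashSet.not_mem_empty)
    set nw := frontier.toList.foldl (pvNewStep n grid reach) ∅ with hnw
    have hvalid_iff : ∀ c : Int × Int, (0 ≤ c.1 ∧ c.1 < n ∧ 0 ≤ c.2 ∧ c.2 < n) ↔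
        PVValid grid.length c := by
      intro c
      unfold PVValid
      rw [hn]
    by_cases hempty : nw.isEmpty = true
    · refine ⟨reach, ?_, ?_⟩
      · simp only [pvSweep]
        rw [← hnw, if_pos hempty]
      · intro c
        constructor
        · exact hreach c
        · intro hc
          induction hc with
          | start => exact h00
          | @step p' q' hp hs ihc =>
            by_cases hpf : p' ∈ frontier
            · obtain ⟨⟨d, hd, hcd⟩, hv, ho⟩ := hs
              subst hcd
              rcases j4 p' (Std.HashSet.mem_toList.mpr hpf) d hd ((hvalid_iff _).mpr hv) ho with h | h
              · exact h
              · rw [Std.HashSet.isEmpty_iff_forall_not_mem] at hempty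
                exact absurd h (hempty _)
            · exact hclosed p' ihc hpf _ hs
    · have hstep : pvSweep n grid (fuel + 1) reach frontier =
          pvSweep n grid fuel (reach.insertMany nw.toList) nw := by
        simp only [pvSweep]
        rw [← hnw, if_neg hempty]
      rw [hstep]
      have hmemu : ∀ c : Int × Int, c ∈ reach.insertMany nw.toList ↔ c ∈ reach ∨ c ∈ nw := by
        intro c
        rw [Std.HashSet.mem_insertMany_list]
        constructor
        · rintro (h | h)
          · exact Or.inl h
          · exact Or.inr (Std.HashSet.mem_toList.mp (List.contains_iff_mem.mp h))
        · rintro (h | h)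
          · exact Or.inl h
          · exact Or.inr (List.contains_iff_mem.mpr (Std.HashSet.mem_toList.mpr h))
      have hsub : ∀ c ∈ reach, c ∈ reach.insertMany nw.toList := by
        intro c hc
        exact (hmemu c).mpr (Or.inl hc)
      have hnwsub : ∀ c ∈ nw, c ∈ reach.insertMany nw.toList := by
        intro c hc
        exact (hmemu c).mpr (Or.inr hc)
      have hgrow : reach.size < (reach.insertMany nw.toList).size := by
        classical
        rw [Bool.not_eq_true] at hempty
        obtain ⟨c0, hc0⟩ := Std.HashSet.isEmpty_eq_false_iff_exists_mem.mp hempty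
        have hc0r : c0 ∉ reach := (j2 c0 hc0).1
        have hss : reach.toList.toFinset ⊂ (reach.insertMany nw.toList).toList.toFinset := by
          constructor
          · intro x hx
            exact List.mem_toFinset.mpr (Std.HashSet.mem_toList.mpr
              (hsub x (Std.HashSet.mem_toList.mp (List.mem_toFinset.mp hx))))
          · intro hcon
            exact hc0r (Std.HashSet.mem_toList.mp (List.mem_toFinset.mp (hcon
              (List.mem_toFinset.mpr (Std.HashSet.mem_toList.mpr (hnwsub c0 hc0))))))
        have hlt := Finset.card_lt_card hss
        rwa [List.toFinset_card_of_nodup (pv_nodup_toList _),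
          List.toFinset_card_of_nodup (pv_nodup_toList _),
          Std.HashSet.length_toList, Std.HashSet.length_toList] at hlt
      apply ih (reach.insertMany nw.toList) nw (hsub _ h00)
        (fun q hq => hnwsub q hq)
      · intro q hq
        rcases (hmemu q).mp hq with h | h
        · exact hreach q h
        · obtain ⟨-, q', hq'F, ⟨d, hd, hcd⟩, hb, ho⟩ := j2 q h
          subst hcd
          exact PVReach.step (hreach q' (hfr q' (Std.HashSet.mem_toList.mp hq'F)))
            ⟨⟨d, hd, rfl⟩, (hvalid_iff _).mp hb, ho⟩
      · intro q hq
        rcases (hmemu q).mp hq with h | h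
        · exact hvalid q h
        · obtain ⟨-, q', hq'F, hd', hb, ho⟩ := j2 q h
          exact Or.inr ((hvalid_iff _).mp hb)
      · intro q hq hqnw c hs
        rcases (hmemu q).mp hq with h | h
        · by_cases hqf : q ∈ frontier
          · obtain ⟨⟨d, hd, hcd⟩, hv, ho⟩ := hs
            subst hcd
            rcases j4 q (Std.HashSet.mem_toList.mpr hqf) d hd ((hvalid_iff _).mpr hv) ho with h' | h'
            · exact hsub _ h'
            · exact hnwsub _ h'
          · exact hsub _ (hclosed q h hqf _ hs)
        · exact absurd h hqnw
      · omega

lemma pvIdx_lt (n : Nat) (i : Int) (j : Nat) (h : PySem.List.pyIdx? n i = some j) :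
    j < n := by
  unfold PySem.List.pyIdx? at h
  split_ifs at h with h1 h2 h3 <;> simp_all <;> omega

lemma pySetD_get_mono (row : List String) (x b : Int)
    (h : PySem.List.pyGet? (PySem.List.pySetD row x "#") b = some ".") :
    PySem.List.pyGet? row b = some "." := by
  unfold PySem.List.pySetD PySem.List.pySet? at h
  cases hidx : PySem.List.pyIdx? row.length x with
  | none => rwa [hidx] at h
  | some jb =>
    have hjb := pvIdx_lt _ _ _ hidx
    rw [hidx] at h
    simp only [Option.map_some, Option.getD_some] at h
    unfold PySem.List.pyGet? at h ⊢
    rw [List.length_set] at h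
    cases hkidx : PySem.List.pyIdx? row.length b with
    | none => rw [hkidx] at h; simp at h
    | some kb =>
      rw [hkidx] at h
      simp only [Option.bind_some] at h ⊢
      rw [List.getElem?_set] at h
      by_cases hjk : jb = kb
      · rw [if_pos hjk, if_pos (hjk ▸ hjb)] at h
        simp at h
      · rwa [if_neg hjk] at h

lemma pvSetCell_shape (g : List (List String)) (y x : Int) :
    pvSetCell g y x = g ∨
      ∃ j : Nat, ∃ hj : j < g.length,
        pvSetCell g y x = g.set j (PySem.List.pySetD g[j] x "#") := by
  unfold pvSetCell PySem.List.pySetD PySem.List.pySet? PySem.List.pyGetD PySem.List.pyGet?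
  cases hidx : PySem.List.pyIdx? g.length y with
  | none => simp
  | some j =>
    have hj := pvIdx_lt _ _ _ hidx
    right
    refine ⟨j, hj, ?_⟩
    simp [List.getElem?_eq_getElem hj]

lemma pvSetCell_length (g : List (List String)) (y x : Int) :
    (pvSetCell g y x).length = g.length := by
  rcases pvSetCell_shape g y x with h | ⟨j, hj, h⟩ <;> rw [h]
  rw [List.length_set]

lemma pvCell_mono (g : List (List String)) (y x a b : Int)
    (h : pvCell (pvSetCell g y x) a b = some ".") : pvCell g a b = some "." := by
  rcases pvSetCell_shape g y x with hs | ⟨j, hj, hs⟩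
  · rwa [hs] at h
  · rw [hs] at h
    unfold pvCell PySem.List.pyGet? at h ⊢
    rw [List.length_set] at h
    cases hkidx : PySem.List.pyIdx? g.length a with
    | none => rw [hkidx] at h; simp at h
    | some ka =>
      rw [hkidx] at h
      simp only [Option.bind_some] at h ⊢
      rw [List.getElem?_set] at h
      by_cases hjk : j = ka
      · rw [if_pos hjk, if_pos (hjk ▸ hj)] at h
        simp only [Option.bind_some] at h
        subst hjk
        rw [List.getElem?_eq_getElem hj]
        simp only [Option.bind_some]
        exact pySetD_get_mono _ _ _ h
      · rwa [if_neg hjk] at h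

lemma pvReach_mono (g : List (List String)) (y x : Int) (c : Int × Int)
    (h : PVReach (pvSetCell g y x) c) : PVReach g c := by
  induction h with
  | start => exact PVReach.start
  | @step p q hp hs ihp =>
    obtain ⟨hd, hv, ho⟩ := hs
    refine PVReach.step ihp ⟨hd, ?_, pvCell_mono g y x q.1 q.2 ho⟩
    rwa [pvSetCell_length] at hv

-- grid after the first k bytes (shared shape of both programs' grid-building loops)
def pvGridN (gs : Int) (bl : List (Int × Int)) (k : Nat) : List (List String) :=
  (bl.take k).foldl (fun g p => pvSetCell g p.2 p.1) (pvMakeGrid gs)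

-- A's blocking predicate, semantically
def pvAB (gs : Int) (bl : List (Int × Int)) (k : Nat) : Prop :=
  ¬ PVReach (pvGridN gs bl k) (gs - 1, gs - 1)

lemma pvFold_length (l : List (Int × Int)) (g0 : List (List String)) :
    (l.foldl (fun g p => pvSetCell g p.2 p.1) g0).length = g0.length := by
  induction l generalizing g0 with
  | nil => rfl
  | cons p l ih => rw [List.foldl_cons, ih, pvSetCell_length]

lemma pvGridN_length (gs : Int) (bl : List (Int × Int)) (k : Nat) :
    (pvGridN gs bl k).length = gs.toNat := by
  unfold pvGridN
  rw [pvFold_length]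
  simp [pvMakeGrid]

lemma pvGridN_succ (gs : Int) (bl : List (Int × Int)) (k : Nat) (hk : k < bl.length) :
    pvGridN gs bl (k + 1) = pvSetCell (pvGridN gs bl k) (bl[k].2) (bl[k].1) := by
  unfold pvGridN
  have h1 : List.take (k + 1) bl = List.take k bl ++ [bl[k]] := by
    rw [List.take_add_one, List.getElem?_eq_getElem hk]
    rfl
  rw [h1, List.foldl_append]
  rfl

lemma pvAB_succ_mono (gs : Int) (bl : List (Int × Int)) (k : Nat) (hk : k < bl.length)
    (h : pvAB gs bl k) : pvAB gs bl (k + 1) := by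
  unfold pvAB at h ⊢
  rw [pvGridN_succ gs bl k hk]
  intro hre
  exact h (pvReach_mono _ _ _ _ hre)

lemma pvAB_mono (gs : Int) (bl : List (Int × Int)) (j k : Nat) (hjk : j ≤ k)
    (hk : k ≤ bl.length) (h : pvAB gs bl j) : pvAB gs bl k := by
  induction k with
  | zero =>
    have : j = 0 := by omega
    exact this ▸ h
  | succ k ih =>
    by_cases hjk' : j = k + 1
    · exact hjk' ▸ h
    · exact pvAB_succ_mono gs bl k (by omega) (ih (by omega) (by omega))

lemma pvGridN_clamp (gs : Int) (bl : List (Int × Int)) (k : Nat) (hk : bl.length ≤ k) :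
    pvGridN gs bl k = pvGridN gs bl bl.length := by
  unfold pvGridN
  rw [List.take_of_length_le hk, List.take_length]

lemma pvAB_mono' (gs : Int) (bl : List (Int × Int)) (j k : Nat) (hjk : j ≤ k)
    (h : pvAB gs bl j) : pvAB gs bl k := by
  by_cases hk : k ≤ bl.length
  · exact pvAB_mono gs bl j k hjk hk h
  · unfold pvAB
    rw [pvGridN_clamp gs bl k (by omega)]
    by_cases hj : j ≤ bl.length
    · exact pvAB_mono gs bl j bl.length hj (le_refl _) h
    · unfold pvAB at h
      rwa [pvGridN_clamp gs bl j (by omega)] at h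


lemma pvSweep_start (n : Int) (grid : List (List String)) (hn : n = (grid.length : Int)) :
    ∃ R, pvSweep n grid (grid.length * grid.length + 2)
        (Std.HashSet.ofList [((0 : Int), (0 : Int))]) (Std.HashSet.ofList [((0 : Int), (0 : Int))]) =
        some R ∧ (∀ c, c ∈ R ↔ PVReach grid c) := by
  have hmem0 : ∀ r : Int × Int, r ∈ Std.HashSet.ofList [((0 : Int), (0 : Int))] ↔
      r = ((0 : Int), (0 : Int)) := by
    intro r
    rw [Std.HashSet.mem_ofList]
    simp [List.contains_eq_mem, eq_comm]
  apply pvSweep_correct n grid hn (grid.length * grid.length + 2)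
    (Std.HashSet.ofList [((0 : Int), (0 : Int))]) (Std.HashSet.ofList [((0 : Int), (0 : Int))])
    ((hmem0 _).mpr rfl)
    (by intro r hr; exact hr)
    (by intro r hr; rw [hmem0] at hr; subst hr; exact PVReach.start)
    (by intro r hr; rw [hmem0] at hr; exact Or.inl hr)
    (by intro r hr hr2; rw [hmem0] at hr; simp [hr] at hr2)
    (by omega)

lemma pvBlocked_iff (gs : Int) (bl : List (Int × Int)) (hgs : 1 ≤ gs) (k : Int)
    (hk : 0 ≤ k) : (pvBlocked gs bl k = true) ↔ pvAB gs bl k.toNat := by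
  unfold pvBlocked
  dsimp only
  rw [PySem.List.slice_to bl hk]
  have hgrid : (bl.take k.toNat).foldl (fun g p => pvSetCell g p.2 p.1) (pvMakeGrid gs) =
      pvGridN gs bl k.toNat := rfl
  rw [hgrid]
  have hn : gs = ((pvGridN gs bl k.toNat).length : Int) := by
    rw [pvGridN_length]
    omega
  obtain ⟨R, hR, hmem⟩ := pvSweep_start gs (pvGridN gs bl k.toNat) hn
  rw [hR]
  simp only [Bool.not_eq_true']
  unfold pvAB
  rw [← hmem (gs - 1, gs - 1), Std.HashSet.mem_iff_contains]
  simp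

lemma pvBlocked_mono (gs : Int) (bl : List (Int × Int)) (hgs : 1 ≤ gs) (j k : Int)
    (hj : 0 ≤ j) (hjk : j ≤ k) (h : pvBlocked gs bl j = true) : pvBlocked gs bl k = true := by
  rw [pvBlocked_iff gs bl hgs k (by omega)]
  rw [pvBlocked_iff gs bl hgs j hj] at h
  exact pvAB_mono' gs bl j.toNat k.toNat (by omega) h
lemma pvBisect_spec (gs : Int) (bl : List (Int × Int)) (hgs : 1 ≤ gs) :
    ∀ (d : Nat) (lo hi : Int), (hi - lo).toNat = d → 1 ≤ lo → lo ≤ hi →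
      pvBlocked gs bl hi = true →
      (∀ j : Int, 1 ≤ j → j < lo → pvBlocked gs bl j = false) →
      1 ≤ pvBisect gs bl lo hi ∧ pvBisect gs bl lo hi ≤ hi ∧
        pvBlocked gs bl (pvBisect gs bl lo hi) = true ∧
        (∀ j : Int, 1 ≤ j → j < pvBisect gs bl lo hi → pvBlocked gs bl j = false) := by
  intro d
  induction d using Nat.strong_induction_on with
  | _ d ih =>
    intro lo hi hd h1 hlh hhi hlow
    by_cases h : lo < hi
    · have hmid1 := (PySem.Int.floordiv_two_mid_bounds (le_of_lt h)).1
      have hmid2 : PySem.Int.floordiv (lo + hi) 2 < hi := by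
        rw [PySem.Int.floordiv_lt_iff_lt_mul (by omega)]
        omega
      set mid := PySem.Int.floordiv (lo + hi) 2 with hmid
      have hunf : pvBisect gs bl lo hi =
          if pvBlocked gs bl mid then pvBisect gs bl lo mid
          else pvBisect gs bl (mid + 1) hi := by
        rw [pvBisect, dif_pos h]
      by_cases hb : pvBlocked gs bl mid = true
      · rw [hunf, if_pos hb]
        obtain ⟨a1, a2, a3, a4⟩ := ih (mid - lo).toNat (by omega) lo mid rfl h1 (by omega) hb hlow
        exact ⟨a1, by omega, a3, a4⟩
      · rw [hunf, if_neg hb]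
        refine ih (hi - (mid + 1)).toNat (by omega) (mid + 1) hi rfl (by omega) (by omega) hhi ?_
        intro j hj1 hj2
        by_cases hjlo : j < lo
        · exact hlow j hj1 hjlo
        · rw [← Bool.not_eq_true]
          intro hbj
          exact hb (pvBlocked_mono gs bl hgs j mid (by omega) (by omega) hbj)
    · have hle : lo = hi := by omega
      have hunf : pvBisect gs bl lo hi = lo := by
        rw [pvBisect, dif_neg h]
      rw [hunf]
      exact ⟨h1, by omega, hle ▸ hhi, hlow⟩

lemma pvIsPath_iff_AB (gs : Int) (bl : List (Int × Int)) (k : Nat) :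
    (pvIsPathPossible (pvGridN gs bl k) (0, 0) (gs - 1, gs - 1) = true) ↔ ¬ pvAB gs bl k := by
  rw [pvIsPathPossible_iff]
  unfold pvAB
  exact not_not.symm

lemma pvGo_none (gs : Int) (bl : List (Int × Int)) :
    ∀ (l : List (Int × Int)) (k : Nat), l = bl.drop k →
      (∀ j : Nat, k < j → j ≤ bl.length → ¬ pvAB gs bl j) →
      pvFindGo (gs - 1, gs - 1) (pvGridN gs bl k) l = none := by
  intro l
  induction l with
  | nil => intro k _ _; rfl
  | cons c l ih =>
    intro k hl hno
    have hk : k < bl.length := by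
      by_contra hge
      rw [List.drop_eq_nil_of_le (by omega)] at hl
      exact List.cons_ne_nil c l hl
    rw [List.drop_eq_getElem_cons hk] at hl
    obtain ⟨hc, hrest⟩ := List.cons.inj hl
    obtain ⟨x, y⟩ := c
    have hxy : bl[k] = (x, y) := hc ▸ rfl
    simp only [pvFindGo]
    have hgrid : pvSetCell (pvGridN gs bl k) y x = pvGridN gs bl (k + 1) := by
      rw [pvGridN_succ gs bl k hk, hxy]
    rw [hgrid]
    rw [if_pos ((pvIsPath_iff_AB gs bl (k + 1)).mpr (hno (k + 1) (by omega) (by omega)))]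
    exact ih (k + 1) hrest (fun j hj1 hj2 => hno j (by omega) hj2)

lemma pvGo_some (gs : Int) (bl : List (Int × Int)) (l : Int)
    (hl1 : 1 ≤ l) (hlm : l ≤ (bl.length : Int)) (hbl : pvAB gs bl l.toNat)
    (hmin : ∀ j : Nat, 1 ≤ j → (j : Int) < l → ¬ pvAB gs bl j) :
    ∀ (rest : List (Int × Int)) (k : Nat), rest = bl.drop k → (k : Int) < l →
      pvFindGo (gs - 1, gs - 1) (pvGridN gs bl k) rest =
        some (PySem.Int.toStr (bl[(l - 1).toNat]'(by omega)).1 ++ "," ++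
          PySem.Int.toStr (bl[(l - 1).toNat]'(by omega)).2) := by
  intro rest
  induction rest with
  | nil =>
    intro k hrest hkl
    exfalso
    have : bl.length ≤ k := by
      by_contra hlt
      rw [List.drop_eq_getElem_cons (by omega)] at hrest
      exact List.cons_ne_nil _ _ hrest.symm
    omega
  | cons c rest ih =>
    intro k hrest hkl
    have hk : k < bl.length := by omega
    rw [List.drop_eq_getElem_cons hk] at hrest
    obtain ⟨hc, htail⟩ := List.cons.inj hrest
    obtain ⟨x, y⟩ := c
    have hxy : bl[k] = (x, y) := hc ▸ rfl
    simp only [pvFindGo]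
    have hgrid : pvSetCell (pvGridN gs bl k) y x = pvGridN gs bl (k + 1) := by
      rw [pvGridN_succ gs bl k hk, hxy]
    rw [hgrid]
    by_cases hkl1 : ((k : Int) + 1) < l
    · rw [if_pos ((pvIsPath_iff_AB gs bl (k + 1)).mpr (hmin (k + 1) (by omega) (by push_cast; omega)))]
      exact ih (k + 1) htail (by push_cast; omega)
    · have hkeq : (k : Int) + 1 = l := by omega
      have hab : pvAB gs bl (k + 1) := by
        have : (k + 1 : Nat) = l.toNat := by omega
        rw [this]
        exact hbl
      rw [if_neg (by rw [pvIsPath_iff_AB]; exact fun hno => hno hab)]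
      have hidx : (l - 1).toNat = k := by omega
      have heq : bl[(l - 1).toNat]'(by omega) = (x, y) := by
        simp only [hidx]
        exact hxy
      rw [heq]

theorem pv_main (gs : Int) (bl : List (Int × Int))
    (hpre : ∀ p ∈ bl, -gs ≤ p.1 ∧ p.1 < gs ∧ -gs ≤ p.2 ∧ p.2 < gs) :
    find_blocking_byte gs bl = find_blocking_byte_alt gs bl := by
  by_cases hnil : bl = []
  · subst hnil
    rfl
  · obtain ⟨p0, hp0⟩ := List.exists_mem_of_ne_nil bl hnil
    have hgs : 1 ≤ gs := by
      have := hpre p0 hp0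
      omega
    have hm1 : 1 ≤ bl.length := List.length_pos_iff.mpr hnil
    have hlen : PySem.List.len bl = (bl.length : Int) := PySem.List.len_eq bl
    have hA : find_blocking_byte gs bl =
        pvFindGo (gs - 1, gs - 1) (pvGridN gs bl 0) (bl.drop 0) := rfl
    by_cases hb : pvBlocked gs bl ((bl.length : Int)) = true
    · -- some byte blocks: binary search finds the least blocking prefix
      obtain ⟨r1, r2, r3, r4⟩ := pvBisect_spec gs bl hgs ((bl.length : Int) - 1).toNat 1
        (bl.length : Int) rfl (le_refl _) (by omega) hb (by omega)
      set r := pvBisect gs bl 1 (bl.length : Int) with hr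
      have hab : pvAB gs bl r.toNat := by
        rw [← pvBlocked_iff gs bl hgs r (by omega)]
        exact r3
      have habr : pvAB gs bl ((r.toNat : Int)).toNat := by
        rwa [show ((r.toNat : Int)).toNat = r.toNat by omega]
      have hmin : ∀ j : Nat, 1 ≤ j → (j : Int) < r → ¬ pvAB gs bl j := by
        intro j hj1 hj2 habj
        have hbj := r4 (j : Int) (by omega) hj2
        rw [← Bool.not_eq_true] at hbj
        apply hbj
        rw [pvBlocked_iff gs bl hgs (j : Int) (by omega)]
        rwa [Int.toNat_natCast]
      have hgoal := pvGo_some gs bl r r1 (by omega) hab hmin (bl.drop 0) 0 rfl (by omega)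
      rw [hA, hgoal]
      unfold find_blocking_byte_alt
      rw [if_neg (by
        push_neg
        refine ⟨hnil, ?_⟩
        rw [hlen, hb]
        simp)]
      have hget : PySem.List.pyGetD bl (r - 1) ((0 : Int), (0 : Int)) =
          bl[(r - 1).toNat]'(by omega) :=
        PySem.List.pyGetD_eq_getElem bl (0, 0) (by omega) (by omega)
      dsimp only
      rw [hlen, ← hr, hget]
    · -- no prefix ever blocks
      rw [hA, pvGo_none gs bl (bl.drop 0) 0 rfl ?hno]
      · unfold find_blocking_byte_alt
        rw [if_pos (Or.inr (by rw [hlen]; exact Bool.not_eq_true _ ▸ hb))]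
      case hno =>
        intro j hj1 hj2 habj
        apply hb
        rw [pvBlocked_iff gs bl hgs (bl.length : Int) (by omega), Int.toNat_natCast]
        exact pvAB_mono' gs bl j bl.length (by omega) habj

-- ===== VERDICT (by name: the statement is the Claim_ definition above) =====
theorem find_blocking_byte_spec : Claim_equal_find_blocking_byte := by
  intro grid_size bytes_list _ hpre
  unfold Spec_find_blocking_byte
  exact pv_main grid_size bytes_list hpre
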